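-- pv_equiv track=rewrite | github.com/Jianghanxiao/Dezhou_poke | dezhou.py | statNum
-- ===== SOURCE A (Python) =====
-- def statNum(pool):
--     numbers = {}
--     for i in pool:
--         n = i[1:]
--         if n not in numbers:
--             numbers[n] = 0
--         numbers[n] += 1
--     return numbers
-- ===== SOURCE B (Python) =====
-- def statNum(pool):
--     keys = [i[1:] for i in pool]
--     return {k: keys.count(k) for k in dict.fromkeys(keys)}
-- ===== Notes on version B (the rewrite author's own statement) =====
-- stated objective: simpler
-- what changed: Replaces the incremental dict-update loop with a two-pass comprehension: extract all keys once, deduplicate them in first-occurrence order, and build the result by counting each distinct key in the key list.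
import Mathlib
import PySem

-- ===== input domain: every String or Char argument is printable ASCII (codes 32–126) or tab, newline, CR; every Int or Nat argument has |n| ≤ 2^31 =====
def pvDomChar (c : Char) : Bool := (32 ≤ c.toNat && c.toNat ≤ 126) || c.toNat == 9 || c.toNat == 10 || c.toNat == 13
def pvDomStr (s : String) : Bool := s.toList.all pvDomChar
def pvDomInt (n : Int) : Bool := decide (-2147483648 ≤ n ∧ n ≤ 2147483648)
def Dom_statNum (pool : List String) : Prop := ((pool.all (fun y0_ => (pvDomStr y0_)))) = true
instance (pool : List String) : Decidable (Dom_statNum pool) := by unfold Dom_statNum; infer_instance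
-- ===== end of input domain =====

-- B replaces A's incremental dict-update loop by a two-pass comprehension
-- (extract keys, dedup in first-occurrence order, count each distinct key); objective: simpler.

-- ===== PORT A =====
def statNum (pool : List String) : List (String × Int) :=
  (pool.foldl (fun numbers i =>
      let n := PySem.Str.slice i (some 1) none
      let numbers := if numbers.contains n then numbers else numbers.insert n 0
      numbers.insert n (numbers.getD n 0 + 1))
    PySem.Dict.empty).items

-- ===== PORT B =====
def statNum_alt (pool : List String) : List (String × Int) :=
  let keys := pool.map (fun i => PySem.Str.slice i (some 1) none)
  (PySem.List.dedup keys).map (fun k => (k, (keys.count k : Int)))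

-- ===== PRECONDITION & SPEC =====
def Spec_statNum (pool : List String) (out : List (String × Int)) : Prop := out = statNum_alt pool
instance (pool : List String) (out : List (String × Int)) : Decidable (Spec_statNum pool out) := by unfold Spec_statNum; infer_instance

-- ===== CLAIM (what is proved, stated in full; the proofs are below) =====
def Claim_equal_statNum : Prop := ∀ (pool : List String), Dom_statNum pool → Spec_statNum pool (statNum pool)

-- ===== LEMMAS AND PROOFS =====

-- A's loop body (the 'if new then insert 0' followed by the += 1 insert) is exactly
-- the counting insert 'd.insert n (d.getD n 0 + 1)'.
theorem stepA_eq (d : PySem.Dict String Int) (n : String) :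
    (let d' := if d.contains n then d else d.insert n 0
     d'.insert n (d'.getD n 0 + 1)) = d.insert n (d.getD n 0 + 1) := by
  by_cases h : d.contains n = true
  · simp [h]
  · have hc : d.contains n = false := by simpa using h
    simp [hc, PySem.Dict.getD_insert_self, PySem.Dict.insert_insert_self,
      PySem.Dict.getD_of_not_contains]

-- ===== VERDICT (by name: the statement is the Claim_ definition above) =====
theorem statNum_spec : Claim_equal_statNum := by
  intro pool _
  unfold Spec_statNum statNum statNum_alt
  rw [show (fun (numbers : PySem.Dict String Int) (i : String) =>
        let n := PySem.Str.slice i (some 1) none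
        let numbers := if numbers.contains n then numbers else numbers.insert n 0
        numbers.insert n (numbers.getD n 0 + 1))
      = (fun d i => d.insert (PySem.Str.slice i (some 1) none)
          (d.getD (PySem.Str.slice i (some 1) none) 0 + 1)) from
      funext fun d => funext fun i => stepA_eq d (PySem.Str.slice i (some 1) none)]
  have h : List.foldl
      (fun (d : PySem.Dict String Int) i =>
        d.insert (PySem.Str.slice i (some 1) none) (d.getD (PySem.Str.slice i (some 1) none) 0 + 1))
      PySem.Dict.empty pool
    = List.foldl (fun (d : PySem.Dict String Int) n => d.insert n (d.getD n 0 + 1))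
      PySem.Dict.empty (pool.map (fun i => PySem.Str.slice i (some 1) none)) := by
    rw [List.foldl_map]
  rw [h, PySem.Dict.foldl_insert_getD_add_one_eq_counter, PySem.Dict.items_counter]
  simp
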